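-- pv_equiv track=rewrite | github.com/tjdonley/rag-blast-radius | src/rag_blast/integrations.py | _is_llamaindex_index_call
-- ===== SOURCE A (Python) =====
-- SUPPORTED_INDEX_SUFFIXES = (
--     ".core.VectorStoreIndex",
--     ".core.indices.vector_store.base.VectorStoreIndex",
-- )
--
-- SUPPORTED_INDEX_FACTORY_METHODS = ("from_documents", "from_vector_store")
--
-- def _is_llamaindex_index_call(call_name: str) -> bool:
--     if not call_name.startswith("llama_index."):
--         return False
--
--     index_call_name = call_name
--     for factory_method in SUPPORTED_INDEX_FACTORY_METHODS:
--         factory_call_name = call_name.removesuffix(f".{factory_method}")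
--         if factory_call_name != call_name:
--             index_call_name = factory_call_name
--             break
--     return any(index_call_name == f"llama_index{suffix}" for suffix in SUPPORTED_INDEX_SUFFIXES)
-- ===== SOURCE B (Python) =====
-- SUPPORTED_INDEX_SUFFIXES = (
--     ".core.VectorStoreIndex",
--     ".core.indices.vector_store.base.VectorStoreIndex",
-- )
--
-- SUPPORTED_INDEX_FACTORY_METHODS = ("from_documents", "from_vector_store")
--
-- _VALID_CALLS = frozenset(
--     f"llama_index{suffix}{extra}"
--     for suffix in SUPPORTED_INDEX_SUFFIXES
--     for extra in ("",) + tuple(f".{m}" for m in SUPPORTED_INDEX_FACTORY_METHODS)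
-- )
--
-- def _is_llamaindex_index_call(call_name: str) -> bool:
--     return call_name in _VALID_CALLS
-- ===== Notes on version B (the rewrite author's own statement) =====
-- stated objective: simpler
-- what changed: Replaces the prefix guard, suffix-stripping loop with break, and any()-scan by a single membership test against a precomputed frozenset of the six accepted call names.
import Mathlib
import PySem

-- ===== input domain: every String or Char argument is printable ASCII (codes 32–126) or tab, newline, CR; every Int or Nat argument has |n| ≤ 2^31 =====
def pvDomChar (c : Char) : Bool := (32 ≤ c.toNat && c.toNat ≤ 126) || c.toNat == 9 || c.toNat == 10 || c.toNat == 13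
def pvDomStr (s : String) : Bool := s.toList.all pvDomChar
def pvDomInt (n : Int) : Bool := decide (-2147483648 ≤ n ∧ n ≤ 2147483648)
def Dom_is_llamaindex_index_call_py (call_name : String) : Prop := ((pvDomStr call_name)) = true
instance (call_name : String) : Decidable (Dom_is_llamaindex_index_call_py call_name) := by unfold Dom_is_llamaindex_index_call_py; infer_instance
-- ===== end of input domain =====

-- B replaces A's prefix guard + suffix-stripping loop + any()-scan by one membership
-- test against a precomputed table of the six accepted call names (objective: simpler).

-- ===== PORT A =====
-- module constants (shared by both versions, as in the Python module)
def pvSuffixes : List (List Char) :=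
  [".core.VectorStoreIndex".toList, ".core.indices.vector_store.base.VectorStoreIndex".toList]
def pvMethods : List (List Char) := ["from_documents".toList, "from_vector_store".toList]

-- str.removesuffix (not in PySem), exact: drop the suffix iff the string ends with it
def pvRemovesuffix (s suf : List Char) : List Char :=
  if PySem.Chars.endswith s suf then s.take (s.length - suf.length) else s

-- the for-loop over factory methods with its break
def pvStripLoop (cs : List Char) : List (List Char) → List Char
  | [] => cs
  | m :: ms =>
      let f := pvRemovesuffix cs ('.' :: m)
      if f ≠ cs then f else pvStripLoop cs ms

def is_llamaindex_index_call_py (call_name : String) : Bool :=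
  if !PySem.Str.startswith call_name "llama_index." then false
  else
    let index_call_name := pvStripLoop call_name.toList pvMethods
    pvSuffixes.any (fun suf => index_call_name == "llama_index".toList ++ suf)

-- ===== PORT B =====
-- the precomputed table: for each suffix the bare form and each method-appended form
def pvValidCalls : List (List Char) :=
  pvSuffixes.flatMap (fun suf =>
    ("llama_index".toList ++ suf) ::
      pvMethods.map (fun m => "llama_index".toList ++ suf ++ '.' :: m))

def is_llamaindex_index_call_py_alt (call_name : String) : Bool :=
  pvValidCalls.contains call_name.toList

-- ===== PRECONDITION & SPEC =====
def Spec_is_llamaindex_index_call_py (call_name : String) (out : Bool) : Prop := out = is_llamaindex_index_call_py_alt call_name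
instance (call_name : String) (out : Bool) : Decidable (Spec_is_llamaindex_index_call_py call_name out) := by unfold Spec_is_llamaindex_index_call_py; infer_instance

-- ===== CLAIM (what is proved, stated in full; the proofs are below) =====
def Claim_equal_is_llamaindex_index_call_py : Prop := ∀ (call_name : String), Dom_is_llamaindex_index_call_py call_name → Spec_is_llamaindex_index_call_py call_name (is_llamaindex_index_call_py call_name)

-- ===== LEMMAS AND PROOFS =====

theorem pvRemovesuffix_of_suffix {t suf : List Char} :
    pvRemovesuffix (t ++ suf) suf = t := by
  unfold pvRemovesuffix
  rw [if_pos (by simp [PySem.Chars.endswith_iff])]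
  simp

-- the three outcomes of the factory-method loop
theorem pvStrip1 (t : List Char) :
    pvStripLoop (t ++ '.' :: "from_documents".toList) pvMethods = t := by
  simp [pvStripLoop, pvMethods, pvRemovesuffix_of_suffix]

theorem pvStrip2 (t : List Char)
    (h1 : PySem.Chars.endswith (t ++ '.' :: "from_vector_store".toList) ('.' :: "from_documents".toList) = false) :
    pvStripLoop (t ++ '.' :: "from_vector_store".toList) pvMethods = t := by
  simp at h1
  simp [pvStripLoop, pvMethods, pvRemovesuffix, h1, PySem.Chars.endswith_iff]

theorem pvStrip0 (cs : List Char)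
    (h1 : PySem.Chars.endswith cs ('.' :: "from_documents".toList) = false)
    (h2 : PySem.Chars.endswith cs ('.' :: "from_vector_store".toList) = false) :
    pvStripLoop cs pvMethods = cs := by
  simp at h1 h2
  simp [pvStripLoop, pvMethods, pvRemovesuffix, h1, h2]

-- A's result characterised as membership in B's table
theorem pvA_iff (cs : List Char) :
    ((if !PySem.Chars.startswith cs "llama_index.".toList then false
      else pvSuffixes.any (fun suf => pvStripLoop cs pvMethods == "llama_index".toList ++ suf)) = true)
    ↔ cs ∈ pvValidCalls := by
  constructor
  · intro h
    split at h
    · exact absurd h (by simp)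
    · simp only [pvSuffixes, List.any_cons, List.any_nil, Bool.or_false, Bool.or_eq_true,
        beq_iff_eq] at h
      by_cases h1 : PySem.Chars.endswith cs ('.' :: "from_documents".toList)
      · obtain ⟨t, rfl⟩ := (PySem.Chars.endswith_iff _ _).mp h1
        rw [pvStrip1] at h
        rcases h with h | h <;> subst h <;> decide
      · rw [Bool.not_eq_true] at h1
        by_cases h2 : PySem.Chars.endswith cs ('.' :: "from_vector_store".toList)
        · obtain ⟨t, rfl⟩ := (PySem.Chars.endswith_iff _ _).mp h2
          rw [pvStrip2 t h1] at h
          rcases h with h | h <;> subst h <;> decide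
        · rw [Bool.not_eq_true] at h2
          rw [pvStrip0 cs h1 h2] at h
          rcases h with h | h <;> subst h <;> decide
  · intro h
    simp only [pvValidCalls, pvSuffixes, pvMethods, List.flatMap_cons, List.flatMap_nil,
      List.map_cons, List.map_nil, List.append_nil, List.mem_append, List.mem_cons,
      List.not_mem_nil, or_false] at h
    rcases h with (h | h | h) | (h | h | h) <;> subst h <;> decide

theorem pvMain (cs : List Char) :
    (if !PySem.Chars.startswith cs "llama_index.".toList then false
     else pvSuffixes.any (fun suf => pvStripLoop cs pvMethods == "llama_index".toList ++ suf))
    = pvValidCalls.contains cs := by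
  have hA := pvA_iff cs
  have hB : pvValidCalls.contains cs = true ↔ cs ∈ pvValidCalls := List.contains_iff_mem
  by_cases hm : cs ∈ pvValidCalls
  · rw [hA.mpr hm, hB.mpr hm]
  · rw [Bool.eq_false_iff.mpr (fun h => hm (hA.mp h)),
      Bool.eq_false_iff.mpr (fun h => hm (hB.mp h))]

-- ===== VERDICT (by name: the statement is the Claim_ definition above) =====
theorem is_llamaindex_index_call_py_spec : Claim_equal_is_llamaindex_index_call_py := by
  intro call_name _
  unfold Spec_is_llamaindex_index_call_py is_llamaindex_index_call_py is_llamaindex_index_call_py_alt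
  simpa [PySem.Str.startswith] using pvMain call_name.toList
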